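-- pv_equiv track=rewrite | github.com/Hmllycat/Algorithms-in-Bioinformatics-KAUST | chapter9/chap9_10.py | form_first_last
-- ===== SOURCE A (Python) =====
-- def form_first_last(bwt):
--
--     set0 = set(bwt)
--     dic = {}
--     for value in set0:
--         value_array = [i for i in bwt if i == value]
--         old_text = [value+str(i) for i in range(1, len(value_array)+1)]
--         dic[value] = old_text
--
--     symbols = [i for i in set0]
--     symbols.sort()
--
--     first_column = []
--     for symbol in symbols:
--         first_column.extend(dic[symbol])
--
--     last_column = []
--     for symbol in bwt:
--         last_column.append(dic[symbol][0])
--         dic[symbol].pop(0)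
--
--     return first_column, last_column
-- ===== SOURCE B (Python) =====
-- def form_first_last(bwt):
--     counts = {}
--     last_column = []
--     for c in bwt:
--         counts[c] = counts.get(c, 0) + 1
--         last_column.append(c + str(counts[c]))
--     first_column = []
--     for c in sorted(counts):
--         first_column.extend(c + str(i) for i in range(1, counts[c] + 1))
--     return first_column, last_column
-- ===== Notes on version B (the rewrite author's own statement) =====
-- stated objective: faster
-- what changed: A rescans the whole text once per distinct symbol to build per-symbol label lists and then pops them one by one; B makes a single counting pass over the text to emit the last column directly and builds the first column from the sorted count table.
import Mathlib
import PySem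

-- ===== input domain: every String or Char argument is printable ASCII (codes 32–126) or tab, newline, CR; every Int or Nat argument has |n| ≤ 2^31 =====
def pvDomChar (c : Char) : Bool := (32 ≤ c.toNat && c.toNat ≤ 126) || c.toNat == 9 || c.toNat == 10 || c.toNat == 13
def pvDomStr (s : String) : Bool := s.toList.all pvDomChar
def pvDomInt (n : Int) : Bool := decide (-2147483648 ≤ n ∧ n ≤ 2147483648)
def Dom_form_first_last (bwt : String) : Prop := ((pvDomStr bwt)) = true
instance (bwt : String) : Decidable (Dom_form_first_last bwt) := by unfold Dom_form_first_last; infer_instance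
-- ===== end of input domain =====

-- B replaces A's per-distinct-symbol rescans of bwt by one counting pass for the last column
-- plus one pass over the sorted count table for the first column (objective: faster).

-- shared label helper: Python's value+str(i) for a one-character string value, in both sources
def pvLabel (c : Char) (i : Int) : String := String.ofList (c :: PySem.Int.toChars i)

-- ===== PORT A =====
-- old_text = [value+str(i) for i in range(1, len(value_array)+1)] where value_array = [i for i in bwt if i == value]
def pvOldText (cs : List Char) (v : Char) : List String :=
  (PySem.List.pyRange 1 (((cs.filter (fun i => i == v)).length : Int) + 1) 1).map (fun i => pvLabel v i)

def form_first_last (bwt : String) : List String × List String :=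
  let cs := bwt.toList
  let set0 : PySem.Set Char := PySem.Set.ofList cs
  let dic : PySem.Dict Char (List String) :=
    set0.foldl (fun d value => d.insert value (pvOldText cs value)) PySem.Dict.empty
  let symbols : List Char := PySem.List.sorted set0 (fun x => x) false
  let first_column : List String := symbols.foldl (fun acc symbol => acc ++ dic.getD symbol []) []
  -- dic[symbol] / dic[symbol][0] / .pop(0) ported via getD / pyGetD / drop 1: exact here, since every
  -- symbol of bwt is a key of dic and its list is nonempty at each step (it holds count(symbol) labels)
  let r := cs.foldl (fun (p : PySem.Dict Char (List String) × List String) symbol =>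
      (p.1.insert symbol ((p.1.getD symbol []).drop 1),
       p.2 ++ [PySem.List.pyGetD (p.1.getD symbol []) 0 ""])) (dic, [])
  (first_column, r.2)

-- ===== PORT B =====
def form_first_last_alt (bwt : String) : List String × List String :=
  let cs := bwt.toList
  let p := cs.foldl (fun (p : PySem.Dict Char Int × List String) c =>
      let counts := p.1.insert c (p.1.getD c 0 + 1)     -- counts[c] = counts.get(c, 0) + 1
      (counts, p.2 ++ [pvLabel c (counts.getD c 0)]))   -- last_column.append(c + str(counts[c]))
    (PySem.Dict.empty, [])
  let counts := p.1
  let first_column := (PySem.List.sorted counts.keys (fun x => x) false).foldl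
      (fun acc c => acc ++ (PySem.List.pyRange 1 (counts.getD c 0 + 1) 1).map (fun i => pvLabel c i)) []
  (first_column, p.2)

-- ===== PRECONDITION & SPEC =====
def Spec_form_first_last (bwt : String) (out : List String × List String) : Prop := out = form_first_last_alt bwt
instance (bwt : String) (out : List String × List String) : Decidable (Spec_form_first_last bwt out) := by unfold Spec_form_first_last; infer_instance

-- ===== CLAIM (what is proved, stated in full; the proofs are below) =====
def Claim_equal_form_first_last : Prop := ∀ (bwt : String), Dom_form_first_last bwt → Spec_form_first_last bwt (form_first_last bwt)

-- ===== LEMMAS AND PROOFS =====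

-- A's dictionary after the building loop, as a function of the text
def pvDicA (cs : List Char) : PySem.Dict Char (List String) :=
  (PySem.Set.ofList cs).foldl (fun d value => d.insert value (pvOldText cs value)) PySem.Dict.empty

-- the last column produced by A's pop-loop, written structurally
def pvALast (d : PySem.Dict Char (List String)) : List Char → List String
  | [] => []
  | c :: l => PySem.List.pyGetD (d.getD c []) 0 "" :: pvALast (d.insert c ((d.getD c []).drop 1)) l

-- the last column produced by B's counting loop, written structurally
def pvBLast (d : PySem.Dict Char Int) : List Char → List String
  | [] => []
  | c :: l => pvLabel c (d.getD c 0 + 1) :: pvBLast (d.insert c (d.getD c 0 + 1)) l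

theorem pvA_loop_split (l : List Char) (d : PySem.Dict Char (List String)) (acc : List String) :
    l.foldl (fun (p : PySem.Dict Char (List String) × List String) symbol =>
      (p.1.insert symbol ((p.1.getD symbol []).drop 1),
       p.2 ++ [PySem.List.pyGetD (p.1.getD symbol []) 0 ""])) (d, acc)
    = (l.foldl (fun d symbol => d.insert symbol ((d.getD symbol []).drop 1)) d,
       acc ++ pvALast d l) := by
  induction l generalizing d acc with
  | nil => simp [pvALast]
  | cons c l ih =>
    simp only [List.foldl_cons]
    rw [ih]
    simp [pvALast]

theorem pvB_loop_split (l : List Char) (d : PySem.Dict Char Int) (acc : List String) :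
    l.foldl (fun (p : PySem.Dict Char Int × List String) c =>
      (p.1.insert c (p.1.getD c 0 + 1),
       p.2 ++ [pvLabel c ((p.1.insert c (p.1.getD c 0 + 1)).getD c 0)])) (d, acc)
    = (l.foldl (fun d c => d.insert c (d.getD c 0 + 1)) d, acc ++ pvBLast d l) := by
  simp only [PySem.Dict.getD_insert_self]
  induction l generalizing d acc with
  | nil => simp [pvBLast]
  | cons c l ih =>
    simp only [List.foldl_cons]
    rw [ih]
    simp [pvBLast]

-- coupling invariant: each key c of the remaining text holds, on A's side, the label tail
-- [c(m+1), …, c(m+r)] where m is B's current count of c and r bounds the occurrences still to come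
def pvInv (l : List Char) (d : PySem.Dict Char (List String)) (dc : PySem.Dict Char Int) : Prop :=
  ∀ c ∈ l, ∃ m r : Nat, l.count c ≤ r ∧ dc.getD c 0 = (m : Int) ∧
    d.getD c [] = (PySem.List.pyRange ((m : Int) + 1) ((m : Int) + 1 + (r : Int)) 1).map (pvLabel c)

theorem pvLast_eq (l : List Char) (d : PySem.Dict Char (List String)) (dc : PySem.Dict Char Int)
    (h : pvInv l d dc) : pvALast d l = pvBLast dc l := by
  induction l generalizing d dc with
  | nil => rfl
  | cons c l ih =>
    obtain ⟨m, r, hr, hm, hd⟩ := h c (List.mem_cons_self)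
    have hrc : l.count c + 1 ≤ r := by
      have h' := hr
      rw [List.count_cons_self] at h'
      exact h'
    have hcons : PySem.List.pyRange ((m : Int) + 1) ((m : Int) + 1 + (r : Int)) 1
        = ((m : Int) + 1) :: PySem.List.pyRange ((m : Int) + 1 + 1) ((m : Int) + 1 + (r : Int)) 1 := by
      exact PySem.List.pyRange_one_cons (by omega)
    simp only [pvALast, pvBLast, hd, hm, hcons, List.map_cons]
    congr 1
    · simp [PySem.List.pyGetD, PySem.List.pyGet?, PySem.List.pyIdx?]
    · apply ih
      intro c' hc'
      by_cases hcc : c' = c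
      · subst hcc
        refine ⟨m + 1, r - 1, ?_, ?_, ?_⟩
        · omega
        · simp [PySem.Dict.getD_insert_self]
        · rw [PySem.Dict.getD_insert_self]
          simp only [List.drop_succ_cons, List.drop_zero]
          have e1 : ((m : Int) + 1 + 1) = ((m + 1 : Nat) : Int) + 1 := by push_cast; ring
          have e2 : ((m : Int) + 1 + (r : Int)) = ((m + 1 : Nat) : Int) + 1 + ((r - 1 : Nat) : Int) := by omega
          rw [e1, e2]
      · obtain ⟨m', r', hr', hm', hd'⟩ := h c' (List.mem_cons_of_mem _ hc')
        refine ⟨m', r', ?_, ?_, ?_⟩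
        · refine le_trans ?_ hr'
          simp [List.count_cons]
        · rw [PySem.Dict.getD_insert_of_ne _ _ _ hcc, hm']
        · rw [PySem.Dict.getD_insert_of_ne _ _ _ hcc, hd']

theorem pvDicA_getD (cs : List Char) (v : Char) (hv : v ∈ cs) :
    (pvDicA cs).getD v [] = pvOldText cs v := by
  apply PySem.Dict.getD_of_mem_items
  · rw [pvDicA, PySem.Dict.items_foldl_insert_fresh (PySem.Set.ofList cs) (fun x => x)
      (fun x => pvOldText cs x) PySem.Dict.empty
      (by intro a _; simp [PySem.Dict.contains_empty])
      (by simp [PySem.Set.nodup_ofList cs])]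
    have hempty : (PySem.Dict.empty : PySem.Dict Char (List String)).items = [] := rfl
    rw [hempty, List.nil_append]
    exact List.mem_map_of_mem ((PySem.Set.mem_ofList cs v).2 hv)
  · exact PySem.Dict.nodup_keys_foldl_insert _ _ _ (by simp [PySem.Dict.keys_empty])

theorem pvOldText_eq (cs : List Char) (v : Char) :
    pvOldText cs v = (PySem.List.pyRange 1 ((cs.count v : Int) + 1) 1).map (pvLabel v) := by
  unfold pvOldText
  have : (cs.filter (fun i => i == v)).length = cs.count v := by
    simp [List.count, List.countP_eq_length_filter]
  rw [this]

theorem pvInv_init (cs : List Char) : pvInv cs (pvDicA cs) PySem.Dict.empty := by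
  intro c hc
  refine ⟨0, cs.count c, le_refl _, by simp [PySem.Dict.getD_empty], ?_⟩
  rw [pvDicA_getD cs c hc, pvOldText_eq]
  push_cast
  ring_nf

-- ===== VERDICT (by name: the statement is the Claim_ definition above) =====
theorem form_first_last_spec : Claim_equal_form_first_last := by
  intro bwt _
  unfold Spec_form_first_last
  simp only [form_first_last, form_first_last_alt]
  rw [pvA_loop_split, pvB_loop_split]
  set cs := bwt.toList with hcs
  have hdic : (PySem.Set.ofList cs).foldl
      (fun d value => d.insert value (pvOldText cs value)) PySem.Dict.empty = pvDicA cs := rfl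
  have hcounter : cs.foldl (fun d c => d.insert c (d.getD c 0 + 1)) PySem.Dict.empty
      = PySem.Dict.counter cs := PySem.Dict.foldl_insert_getD_add_one_eq_counter cs
  simp only [hdic, hcounter]
  refine Prod.ext ?_ ?_
  · -- first columns
    simp only [PySem.Dict.keys_counter]
    apply PySem.List.foldl_congr_mem
    intro acc x hx
    have hxcs : x ∈ cs := (PySem.Set.mem_ofList cs x).1
      ((PySem.List.sorted_perm (PySem.Set.ofList cs) (fun x => x) false).mem_iff.1 hx)
    rw [pvDicA_getD cs x hxcs, pvOldText_eq, PySem.Dict.getD_counter]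
  · -- last columns
    simpa using pvLast_eq cs (pvDicA cs) PySem.Dict.empty (pvInv_init cs)
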